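-- pv_equiv track=rewrite | github.com/DanilkaFish/Updated_TT | data/data_processing.py | st_enumeration1
-- ===== SOURCE A (Python) =====
-- def st_enumeration1(nmodes: int = 36):
--     """
--     Standard numeration for alpha_beta_tree which is effective on my opinion
--     """
--     num_list = []
--     j = 0
--     if nmodes % 2 == 0 and nmodes > 2:
--         for i in range(1, nmodes - 1):
--             if j <= 1:
--                 j += 1
--                 num_list = num_list + [i, i + 2]
--             else:
--                 if j == 2:
--                     j = 3
--                 else:
--                     j = 0
--         if nmodes // 2 % 2 != 0:
--             num_list = num_list + [nmodes - 1, nmodes]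
--         j = 0
--         for i in range(1, nmodes - 1):
--             if j <= 1:
--                 j += 1
--                 num_list = num_list + [i + nmodes, i + 2 + nmodes]
--             else:
--                 if j == 2:
--                     j = 3
--                 else:
--                     j = 0
--         if nmodes // 2 % 2 != 0:
--             num_list = num_list + [nmodes * 2 - 1, 2 * nmodes]
--     return num_list
-- ===== SOURCE B (Python) =====
-- def st_enumeration1(nmodes: int = 36):
--     """Same enumeration generated blockwise: the kept indices come in complete
--     groups of two per period of four, so emit whole 4-element blocks
--     [4k+1, 4k+3, 4k+2, 4k+4] for k < nmodes//4 (a closed-form block count; no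
--     per-index state or test), once for each offset 0 and nmodes, with the odd
--     half tail appended per offset."""
--     if nmodes % 2 != 0 or nmodes <= 2:
--         return []
--     out = []
--     for off in (0, nmodes):
--         for k in range(nmodes // 4):
--             b = 4 * k + off
--             out.extend((b + 1, b + 3, b + 2, b + 4))
--         if (nmodes // 2) % 2 != 0:
--             out.extend((off + nmodes - 1, off + nmodes))
--     return out
-- ===== Notes on version B (the rewrite author's own statement) =====
-- stated objective: alternative
-- what changed: Replaced A's per-index cyclic counter state-machine (run twice) with blockwise generation: the kept indices form complete period-4 groups, so B emits whole 4-element blocks [4k+1,4k+3,4k+2,4k+4] for k < nmodes//4 into one accumulator, looping over the two offsets 0 and nmodes, with no per-index state or test.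
import Mathlib
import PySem

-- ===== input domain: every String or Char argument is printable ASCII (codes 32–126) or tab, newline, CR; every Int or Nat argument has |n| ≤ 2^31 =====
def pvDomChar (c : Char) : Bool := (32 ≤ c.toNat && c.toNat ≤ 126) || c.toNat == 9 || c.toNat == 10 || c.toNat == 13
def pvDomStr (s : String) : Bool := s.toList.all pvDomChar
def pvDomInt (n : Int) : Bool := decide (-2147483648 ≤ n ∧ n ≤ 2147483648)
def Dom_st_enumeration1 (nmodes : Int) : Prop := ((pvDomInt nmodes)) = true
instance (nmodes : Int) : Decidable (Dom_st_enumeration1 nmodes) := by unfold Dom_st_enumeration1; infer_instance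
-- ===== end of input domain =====

-- B generates the enumeration blockwise (whole 4-element blocks, closed-form
-- block count nmodes//4, one accumulator over the two offsets) instead of
-- running A's per-index cyclic-counter state machine twice (objective: alternative).

-- ===== PORT A =====
-- the loop body of A's two for-loops: state is (num_list, j)
def stStepA (g : Int → List Int) (st : List Int × Int) (i : Int) : List Int × Int :=
  if st.2 ≤ 1 then (st.1 ++ g i, st.2 + 1)
  else (st.1, if st.2 = 2 then 3 else 0)

def st_enumeration1 (nmodes : Int) : List Int :=
  if PySem.Int.mod nmodes 2 = 0 ∧ nmodes > 2 then
    let l1 := ((PySem.List.pyRange 1 (nmodes - 1) 1).foldl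
        (stStepA (fun i => [i, i + 2])) ([], 0)).1
    let l2 := if PySem.Int.mod (PySem.Int.floordiv nmodes 2) 2 ≠ 0
        then l1 ++ [nmodes - 1, nmodes] else l1
    let l3 := ((PySem.List.pyRange 1 (nmodes - 1) 1).foldl
        (stStepA (fun i => [i + nmodes, i + 2 + nmodes])) (l2, 0)).1
    if PySem.Int.mod (PySem.Int.floordiv nmodes 2) 2 ≠ 0
      then l3 ++ [nmodes * 2 - 1, 2 * nmodes] else l3
  else []

-- ===== PORT B =====
-- one 4-element block for block index k at offset off
def stBlock (off : Int) (out : List Int) (k : Int) : List Int :=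
  out ++ [4 * k + off + 1, 4 * k + off + 3, 4 * k + off + 2, 4 * k + off + 4]

def st_enumeration1_alt (nmodes : Int) : List Int :=
  if PySem.Int.mod nmodes 2 ≠ 0 ∨ nmodes ≤ 2 then []
  else
    ([0, nmodes] : List Int).foldl (fun out off =>
      let out2 := (PySem.List.pyRange 0 (PySem.Int.floordiv nmodes 4) 1).foldl
        (stBlock off) out
      if PySem.Int.mod (PySem.Int.floordiv nmodes 2) 2 ≠ 0
        then out2 ++ [off + nmodes - 1, off + nmodes] else out2) []

-- ===== PRECONDITION & SPEC =====
def Spec_st_enumeration1 (nmodes : Int) (out : List Int) : Prop := out = st_enumeration1_alt nmodes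
instance (nmodes : Int) (out : List Int) : Decidable (Spec_st_enumeration1 nmodes out) := by unfold Spec_st_enumeration1; infer_instance

-- ===== CLAIM (what is proved, stated in full; the proofs are below) =====
def Claim_equal_st_enumeration1 : Prop := ∀ (nmodes : Int), Dom_st_enumeration1 nmodes → Spec_st_enumeration1 nmodes (st_enumeration1 nmodes)

-- ===== LEMMAS AND PROOFS =====

-- A's j-loop over a consecutive range, started in phase (a-1) % 4, appends g i
-- exactly at the i with (i-1) % 4 < 2.
theorem stLoop_eq (g : Int → List Int) (len : Nat) :
    ∀ (a : Int) (acc : List Int),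
      (PySem.List.pyRange a (a + len) 1).foldl (stStepA g) (acc, (a - 1) % 4)
        = (acc ++ ((PySem.List.pyRange a (a + len) 1).filter
              (fun i => decide (PySem.Int.mod (i - 1) 4 < 2))).flatMap g,
           (a + len - 1) % 4) := by
  induction len with
  | zero =>
      intro a acc
      simp [PySem.List.pyRange_one_eq_nil (le_refl a)]
  | succ n ih =>
      intro a acc
      have haa : a + ((n + 1 : Nat) : Int) = (a + 1) + (n : Int) := by push_cast; ring
      rw [haa]
      have hlt : a < (a + 1) + (n : Int) := by omega
      rw [PySem.List.pyRange_one_cons hlt, List.foldl_cons, List.filter_cons]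
      have hmod : PySem.Int.mod (a - 1) 4 = (a - 1) % 4 :=
        PySem.Int.mod_eq_emod_of_pos (by norm_num)
      by_cases h : (a - 1) % 4 ≤ 1
      · have hcond : decide (PySem.Int.mod (a - 1) 4 < 2) = true := by
          rw [hmod]; simp; omega
        have hstep : stStepA g (acc, (a - 1) % 4) a = (acc ++ g a, ((a + 1) - 1) % 4) := by
          unfold stStepA
          rw [if_pos h]
          have : ((a + 1) - 1) % 4 = (a - 1) % 4 + 1 := by omega
          rw [this]
        rw [hstep, hcond, if_pos rfl, ih (a + 1) (acc ++ g a), List.flatMap_cons,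
          List.append_assoc]
      · have hcond : decide (PySem.Int.mod (a - 1) 4 < 2) = false := by
          rw [hmod]; simp; omega
        have hstep : stStepA g (acc, (a - 1) % 4) a = (acc, ((a + 1) - 1) % 4) := by
          unfold stStepA
          rw [if_neg h]
          have : ((a + 1) - 1) % 4 = if (a - 1) % 4 = 2 then 3 else 0 := by
            by_cases h2 : (a - 1) % 4 = 2 <;> simp [h2] <;> omega
          rw [this]
        rw [hstep, hcond, if_neg (by simp), ih (a + 1) acc]

-- the filtered survivors of range 1..4K form exactly K complete blocks
theorem filter_block (g : Int → List Int) : ∀ (K : Nat),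
    ((PySem.List.pyRange 1 (4 * (K : Int) + 1) 1).filter
        (fun i => decide (PySem.Int.mod (i - 1) 4 < 2))).flatMap g
      = (PySem.List.pyRange 0 (K : Int) 1).foldl
          (fun l k => l ++ g (4 * k + 1) ++ g (4 * k + 2)) [] := by
  intro K
  induction K with
  | zero => simp [PySem.List.pyRange_one_eq_nil]
  | succ n ih =>
      have hsplit : PySem.List.pyRange 1 (4 * ((n + 1 : Nat) : Int) + 1) 1
          = PySem.List.pyRange 1 (4 * (n : Int) + 1) 1
            ++ [4 * (n : Int) + 1, 4 * (n : Int) + 2, 4 * (n : Int) + 3, 4 * (n : Int) + 4] := by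
        rw [PySem.List.pyRange_one_append 1 (4 * (n : Int) + 1) (4 * ((n + 1 : Nat) : Int) + 1)
            (by omega) (by push_cast; omega)]
        congr 1
        rw [PySem.List.pyRange_one_cons (by push_cast; omega),
            PySem.List.pyRange_one_cons (by push_cast; omega),
            PySem.List.pyRange_one_cons (by push_cast; omega),
            PySem.List.pyRange_one_cons (by push_cast; omega),
            PySem.List.pyRange_one_eq_nil (by push_cast; omega)]
        push_cast; ring_nf
      have htail : PySem.List.pyRange 0 ((n + 1 : Nat) : Int) 1
          = PySem.List.pyRange 0 (n : Int) 1 ++ [(n : Int)] := by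
        have := PySem.List.pyRange_one_succ_right (a := 0) (b := (n : Int)) (by omega)
        push_cast
        exact this
      rw [hsplit, List.filter_append, List.flatMap_append, ih, htail, List.foldl_append]
      have hmodv : ∀ (x : Int), 0 ≤ x → PySem.Int.mod x 4 = x % 4 := by
        intro x _; exact PySem.Int.mod_eq_emod_of_pos (by norm_num)
      simp only [List.filter_cons, List.filter_nil,
        hmodv (4 * (n : Int) + 1 - 1) (by omega), hmodv (4 * (n : Int) + 2 - 1) (by omega),
        hmodv (4 * (n : Int) + 3 - 1) (by omega), hmodv (4 * (n : Int) + 4 - 1) (by omega)]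
      have h1 : (4 * (n : Int) + 1 - 1) % 4 < 2 := by omega
      have h2 : (4 * (n : Int) + 2 - 1) % 4 < 2 := by omega
      have h3 : ¬ (4 * (n : Int) + 3 - 1) % 4 < 2 := by omega
      have h4 : ¬ (4 * (n : Int) + 4 - 1) % 4 < 2 := by omega
      simp [h1, h2, h3, h4, List.append_assoc]

-- the trailing two discarded indices of a nmodes ≡ 0 (mod 4) range drop from the filter
theorem filter_drop2 (K : Nat) (hK : 1 ≤ K) :
    (PySem.List.pyRange 1 (4 * (K : Int) + 1) 1).filter
        (fun i => decide (PySem.Int.mod (i - 1) 4 < 2))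
      = (PySem.List.pyRange 1 (4 * (K : Int) - 1) 1).filter
          (fun i => decide (PySem.Int.mod (i - 1) 4 < 2)) := by
  rw [PySem.List.pyRange_one_append 1 (4 * (K : Int) - 1) (4 * (K : Int) + 1)
      (by omega) (by omega), List.filter_append]
  have hrest : PySem.List.pyRange (4 * (K : Int) - 1) (4 * (K : Int) + 1) 1
      = [4 * (K : Int) - 1, 4 * (K : Int)] := by
    rw [PySem.List.pyRange_one_cons (by omega), PySem.List.pyRange_one_cons (by omega),
        PySem.List.pyRange_one_eq_nil (by omega)]
    ring_nf
  rw [hrest]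
  have hm : ∀ (x : Int), 0 ≤ x → PySem.Int.mod x 4 = x % 4 := by
    intro x _; exact PySem.Int.mod_eq_emod_of_pos (by norm_num)
  simp only [List.filter_cons, List.filter_nil,
    hm (4 * (K : Int) - 1 - 1) (by omega), hm (4 * (K : Int) - 1) (by omega)]
  have h3 : ¬ (4 * (K : Int) - 1 - 1) % 4 < 2 := by omega
  have h4 : ¬ (4 * (K : Int) - 1) % 4 < 2 := by omega
  simp [h3, h4]

-- pulling a non-empty accumulator out of B's block fold
theorem stBlock_shift (off : Int) (acc : List Int) (R : List Int) :
    R.foldl (stBlock off) acc = acc ++ R.foldl (stBlock off) [] := by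
  induction R generalizing acc with
  | nil => simp
  | cons x t ih =>
      simp only [List.foldl_cons]
      rw [ih, ih (stBlock off [] x)]
      simp [stBlock, List.append_assoc]

-- A's full filtered-survivor list equals B's K-block fold, for either g
theorem loop_as_blocks (nmodes : Int) (h2 : PySem.Int.mod nmodes 2 = 0) (h3 : nmodes > 2)
    (off : Int) :
    ((PySem.List.pyRange 1 (nmodes - 1) 1).filter
        (fun i => decide (PySem.Int.mod (i - 1) 4 < 2))).flatMap
          (fun i => [i + off, i + 2 + off])
      = (PySem.List.pyRange 0 (PySem.Int.floordiv nmodes 4) 1).foldl (stBlock off) [] := by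
  have hmod2 : nmodes % 2 = 0 := by
    rwa [PySem.Int.mod_eq_emod_of_pos (by norm_num)] at h2
  have hfd : PySem.Int.floordiv nmodes 4 = nmodes / 4 := by
    simp only [PySem.Int.floordiv]
    exact Int.fdiv_eq_ediv_of_nonneg nmodes (by norm_num)
  set K : Nat := (nmodes / 4).toNat with hKdef
  have hKcast : ((K : Int)) = nmodes / 4 := by omega
  have hblock : (fun (l : List Int) (k : Int) => l ++ (fun i => [i + off, i + 2 + off]) (4 * k + 1)
        ++ (fun i => [i + off, i + 2 + off]) (4 * k + 2)) = stBlock off := by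
    funext l k
    simp only [stBlock]
    have e1 : 4 * k + 1 + off = 4 * k + off + 1 := by ring
    have e2 : 4 * k + 1 + 2 + off = 4 * k + off + 3 := by ring
    have e3 : 4 * k + 2 + off = 4 * k + off + 2 := by ring
    have e4 : 4 * k + 2 + 2 + off = 4 * k + off + 4 := by ring
    rw [e1, e2, e3, e4, List.append_assoc]
    rfl
  rw [hfd, ← hKcast]
  by_cases h4 : nmodes % 4 = 0
  · have hn : nmodes - 1 = 4 * (K : Int) - 1 := by omega
    have hK1 : 1 ≤ K := by omega
    rw [hn, ← filter_drop2 K hK1, filter_block, hblock]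
  · have h42 : nmodes % 4 = 2 := by omega
    have hn : nmodes - 1 = 4 * (K : Int) + 1 := by omega
    rw [hn, filter_block, hblock]

-- ===== VERDICT (by name: the statement is the Claim_ definition above) =====
theorem st_enumeration1_spec : Claim_equal_st_enumeration1 := by
  intro nmodes _
  unfold Spec_st_enumeration1
  by_cases hc : PySem.Int.mod nmodes 2 = 0 ∧ nmodes > 2
  · obtain ⟨h2, h3⟩ := hc
    have hlen : nmodes - 1 = 1 + (((nmodes - 2).toNat : Nat) : Int) := by omega
    have hA1 := stLoop_eq (fun i => [i, i + 2]) (nmodes - 2).toNat 1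
    have hA2 := stLoop_eq (fun i => [i + nmodes, i + 2 + nmodes]) (nmodes - 2).toNat 1
    simp only [show ((1 : Int) - 1) % 4 = 0 from rfl] at hA1 hA2
    have hB1 := loop_as_blocks nmodes h2 h3 0
    have hB2 := loop_as_blocks nmodes h2 h3 nmodes
    have hg1 : (fun i => [i + (0:Int), i + 2 + 0]) = (fun i : Int => [i, i + 2]) := by
      funext i; simp
    rw [hg1] at hB1
    have hBna : ¬(PySem.Int.mod nmodes 2 ≠ 0 ∨ nmodes ≤ 2) := by
      rw [not_or]; exact ⟨not_not_intro h2, by omega⟩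
    simp only [st_enumeration1, st_enumeration1_alt]
    rw [if_pos ⟨h2, h3⟩, if_neg hBna, hlen, hA1, hA2]
    simp only [List.foldl_cons, List.foldl_nil, ← hlen, hB1, hB2]
    by_cases ht : PySem.Int.mod (PySem.Int.floordiv nmodes 2) 2 ≠ 0
    · rw [if_pos ht, if_pos ht, if_pos ht, if_pos ht,
        stBlock_shift nmodes
          (List.foldl (stBlock 0) [] (PySem.List.pyRange 0 (PySem.Int.floordiv nmodes 4) 1)
            ++ [0 + nmodes - 1, 0 + nmodes])]
      have e1 : nmodes * 2 - 1 = nmodes + nmodes - 1 := by ring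
      have e2 : (2 : Int) * nmodes = nmodes + nmodes := by ring
      have e3 : (0 : Int) + nmodes - 1 = nmodes - 1 := by ring
      have e4 : (0 : Int) + nmodes = nmodes := by ring
      simp only [e1, e2, e3, e4, List.nil_append, List.append_assoc]
    · rw [if_neg ht, if_neg ht, if_neg ht, if_neg ht,
        stBlock_shift nmodes
          (List.foldl (stBlock 0) [] (PySem.List.pyRange 0 (PySem.Int.floordiv nmodes 4) 1))]
      simp
  · simp only [st_enumeration1, st_enumeration1_alt]
    rw [if_neg hc, if_pos ?_]
    rcases not_and_or.mp hc with h | h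
    · exact Or.inl h
    · exact Or.inr (by omega)
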